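-- pv_equiv track=rewrite | github.com/Electrocyte96/Rosalind-solutions | src/Bioinformatics Stronghold/grph.py | suffix_prefix
-- ===== SOURCE A (Python) =====
-- def suffix_prefix(dna_dict:dict, k:int)->list:
--     edges = []
--     for id, seq in dna_dict.items():
--         for id2, seq2 in dna_dict.items():
--             if seq != seq2:
--                 if seq[-k:] == seq2[:k]:
--                     edges.append([id, id2])
--     return edges
-- ===== SOURCE B (Python) =====
-- def suffix_prefix(dna_dict: dict, k: int) -> list:
--     # Faster: index sequences by k-prefix once, then look up each k-suffix,
--     # instead of comparing every pair of sequences.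
--     index = {}
--     for id2, seq2 in dna_dict.items():
--         index.setdefault(seq2[:k], []).append((id2, seq2))
--     edges = []
--     for id, seq in dna_dict.items():
--         for id2, seq2 in index.get(seq[-k:], ()):
--             if seq != seq2:
--                 edges.append([id, id2])
--     return edges
-- ===== Notes on version B (the rewrite author's own statement) =====
-- stated objective: faster
-- what changed: Replaces the all-pairs nested scan with a dict indexing sequences by their k-prefix, so each k-suffix is looked up once and only matching candidates are scanned.
import Mathlib
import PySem

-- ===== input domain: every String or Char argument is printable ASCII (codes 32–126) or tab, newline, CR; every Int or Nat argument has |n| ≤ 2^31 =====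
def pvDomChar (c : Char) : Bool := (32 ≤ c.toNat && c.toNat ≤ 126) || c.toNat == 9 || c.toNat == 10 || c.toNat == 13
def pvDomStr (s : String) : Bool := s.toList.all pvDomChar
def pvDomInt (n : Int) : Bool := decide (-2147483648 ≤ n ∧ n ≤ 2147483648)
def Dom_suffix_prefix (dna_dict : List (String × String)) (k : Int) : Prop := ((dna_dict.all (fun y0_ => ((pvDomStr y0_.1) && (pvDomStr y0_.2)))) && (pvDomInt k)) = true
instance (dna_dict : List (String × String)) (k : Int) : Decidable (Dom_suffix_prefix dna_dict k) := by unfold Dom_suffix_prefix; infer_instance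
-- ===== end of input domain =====

-- B replaces A's all-pairs scan by a dict indexing sequences by their k-prefix,
-- looking up each k-suffix once (objective: faster).

-- ===== PORT A =====
-- nested loops over the dict's items; edges ++ [[id, id2]] when seq ≠ seq2 and seq[-k:] == seq2[:k]
def suffix_prefix (dna_dict : List (String × String)) (k : Int) : List (List String) :=
  let items := (PySem.Dict.ofList dna_dict).items
  items.foldl (fun edges p =>
    items.foldl (fun edges q =>
      if p.2 ≠ q.2 then
        if PySem.Str.slice p.2 (some (-k)) none = PySem.Str.slice q.2 none (some k) then
          edges ++ [[p.1, q.1]]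
        else edges
      else edges) edges) []

-- ===== PORT B =====
-- index: dict from k-prefix to the list of (id, seq) items with that prefix (setdefault/append = modify with default [])
def suffix_prefix_alt (dna_dict : List (String × String)) (k : Int) : List (List String) :=
  let items := (PySem.Dict.ofList dna_dict).items
  let index := items.foldl
    (fun d q => d.modify (PySem.Str.slice q.2 none (some k)) [] (· ++ [q]))
    (PySem.Dict.empty : PySem.Dict String (List (String × String)))
  items.foldl (fun edges p =>
    (index.getD (PySem.Str.slice p.2 (some (-k)) none) []).foldl (fun edges q =>
      if p.2 ≠ q.2 then edges ++ [[p.1, q.1]] else edges) edges) []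

-- ===== PRECONDITION & SPEC =====
def Spec_suffix_prefix (dna_dict : List (String × String)) (k : Int) (out : List (List String)) : Prop := out = suffix_prefix_alt dna_dict k
instance (dna_dict : List (String × String)) (k : Int) (out : List (List String)) : Decidable (Spec_suffix_prefix dna_dict k out) := by unfold Spec_suffix_prefix; infer_instance

-- ===== CLAIM (what is proved, stated in full; the proofs are below) =====
def Claim_equal_suffix_prefix : Prop := ∀ (dna_dict : List (String × String)) (k : Int), Dom_suffix_prefix dna_dict k → Spec_suffix_prefix dna_dict k (suffix_prefix dna_dict k)

-- ===== LEMMAS AND PROOFS =====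

-- the index built by the modify-loop holds, at key c, exactly the items whose k-prefix is c, in order
theorem pv_bucket (l : List (String × String)) (key : String × String → String)
    (d : PySem.Dict String (List (String × String))) (c : String) :
    (l.foldl (fun d q => d.modify (key q) [] (· ++ [q])) d).getD c []
      = d.getD c [] ++ l.filter (fun q => key q == c) := by
  induction l generalizing d with
  | nil => simp
  | cons q l ih =>
    simp only [List.foldl_cons, List.filter_cons, ih, PySem.Dict.getD_modify]
    by_cases h : c = key q
    · simp [h]
    · have h' : (key q == c) = false := by simpa [beq_iff_eq] using fun e => h e.symm
      simp [h, h']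

-- filtering by the match condition first, then testing seq ≠ seq2, equals A's nested ifs
theorem pv_inner (P Q : String × String → Prop) [DecidablePred P] [DecidablePred Q]
    (g : String × String → List String) (l : List (String × String)) (acc : List (List String)) :
    l.foldl (fun e q => if P q then (if Q q then e ++ [g q] else e) else e) acc
      = (l.filter (fun q => decide (Q q))).foldl (fun e q => if P q then e ++ [g q] else e) acc := by
  induction l generalizing acc with
  | nil => rfl
  | cons q l ih =>
    simp only [List.foldl_cons, List.filter_cons]
    by_cases hQ : Q q <;> by_cases hP : P q <;> simp [hQ, hP, ih]

-- ===== VERDICT (by name: the statement is the Claim_ definition above) =====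
theorem suffix_prefix_spec : Claim_equal_suffix_prefix := by
  intro dna_dict k _
  unfold Spec_suffix_prefix suffix_prefix suffix_prefix_alt
  simp only []
  apply PySem.List.foldl_congr_mem
  intro edges p _
  rw [pv_bucket _ (fun q => PySem.Str.slice q.2 none (some k)) _ _]
  rw [PySem.Dict.getD_empty]
  rw [pv_inner (fun q => p.2 ≠ q.2)
      (fun q => PySem.Str.slice p.2 (some (-k)) none = PySem.Str.slice q.2 none (some k))
      (fun q => [p.1, q.1])]
  congr 1
  apply List.filter_congr
  intro q _
  have hb : ∀ a b : String, (a == b) = decide (b = a) := by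
    intro a b
    by_cases h : a = b
    · subst h; simp
    · rw [decide_eq_false (fun e => h e.symm)]
      exact beq_eq_false_iff_ne.mpr h
  rw [hb]
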